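-- pv_equiv track=rewrite | github.com/rp2knight/rp2knight.github.io | riddlers/code/predictions.py | genResult
-- ===== SOURCE A (Python) =====
-- def genResult(n):
--     work = [[]]
--     out = []
--     while(True):
--         if (len(work) == 0):
--             return(out)
--         seq = work.pop()
--         if ((seq.count('w') == n) or (seq.count('l') == n)):
--             out.append(seq)
--         if ((seq.count('w') < n) and (seq.count('l') < n)):
--             seq1 = seq.copy()
--             seq1.append('w')
--             seq2 = seq.copy()
--             seq2.append('l')
--             work.append(seq1)
--             work.append(seq2)
-- ===== SOURCE B (Python) =====
-- def genResult(n):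
--     out = []
--     def rec(seq, w, l):
--         if w == n or l == n:
--             out.append(seq)
--         if w < n and l < n:
--             rec(seq + ['l'], w, l + 1)
--             rec(seq + ['w'], w + 1, l)
--     rec([], 0, 0)
--     return out
-- ===== Notes on version B (the rewrite author's own statement) =====
-- stated objective: simpler
-- what changed: Replaces the explicit work-stack while-loop that recounts 'w'/'l' with seq.count on every pop by a recursive DFS helper carrying the two counts incrementally.
import Mathlib
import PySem

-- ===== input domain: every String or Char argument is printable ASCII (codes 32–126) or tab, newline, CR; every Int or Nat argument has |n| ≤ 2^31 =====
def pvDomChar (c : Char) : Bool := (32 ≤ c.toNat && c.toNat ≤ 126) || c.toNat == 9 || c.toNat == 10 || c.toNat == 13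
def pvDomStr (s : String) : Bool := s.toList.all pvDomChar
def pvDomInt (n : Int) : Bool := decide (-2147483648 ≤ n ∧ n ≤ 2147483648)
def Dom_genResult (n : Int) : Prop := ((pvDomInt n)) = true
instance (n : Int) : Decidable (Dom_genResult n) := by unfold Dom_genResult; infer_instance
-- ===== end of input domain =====

-- B replaces A's explicit work-stack loop (which recounts 'w'/'l' on every pop)
-- by a recursive DFS helper carrying the two counts incrementally; objective: simpler.

-- ===== PORT A =====
-- A's while-loop over the explicit stack `work`; the stack top (Python list end,
-- the element `pop()` removes) is the HEAD of the Lean list, so pushing seq1 ('w')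
-- then seq2 ('l') makes the stack (seq++["l"]) :: (seq++["w"]) :: rest, and `out`
-- collects emitted sequences in chronological (append) order.  The loop is made
-- structurally recursive on a fuel = pvMeasure, a strict upper bound on the
-- number of iterations (proved below); the state and the steps are A's own.
def pvMeasure (n : Int) (work : List (List String)) : Nat :=
  (work.map (fun s => 3 ^ ((2 * n + 1 - (s.count "w" : Int) - (s.count "l" : Int)).toNat))).sum

def genLoopF (n : Int) : Nat → List (List String) → List (List String)
  | 0, _ => []
  | _, [] => []
  | fuel + 1, seq :: rest =>
    (if ((seq.count "w" : Int) = n ∨ (seq.count "l" : Int) = n) then [seq] else []) ++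
    (if ((seq.count "w" : Int) < n ∧ (seq.count "l" : Int) < n) then
      genLoopF n fuel ((seq ++ ["l"]) :: (seq ++ ["w"]) :: rest)
    else
      genLoopF n fuel rest)

def genResult (n : Int) : List (List String) := genLoopF n (pvMeasure n [[]]) [[]]

-- ===== PORT B =====
-- B's nested `rec(seq, w, l)`: emit, then recurse on 'l' then 'w'; `out.append`
-- order becomes list concatenation.  Structurally recursive on a fuel that
-- strictly bounds the recursion depth 2*n - w - l (proved below).
def genRecF (n : Int) : Nat → List String → Int → Int → List (List String)
  | 0, _, _, _ => []
  | fuel + 1, seq, w, l =>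
    (if w = n ∨ l = n then [seq] else []) ++
    (if w < n ∧ l < n then
      genRecF n fuel (seq ++ ["l"]) w (l + 1) ++ genRecF n fuel (seq ++ ["w"]) (w + 1) l
    else [])

def genResult_alt (n : Int) : List (List String) := genRecF n ((2 * n).toNat + 1) [] 0 0

-- ===== PRECONDITION & SPEC =====
def Spec_genResult (n : Int) (out : List (List String)) : Prop := out = genResult_alt n
instance (n : Int) (out : List (List String)) : Decidable (Spec_genResult n out) := by unfold Spec_genResult; infer_instance

-- ===== CLAIM (what is proved, stated in full; the proofs are below) =====
def Claim_equal_genResult : Prop := ∀ (n : Int), Dom_genResult n → Spec_genResult n (genResult n)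

-- ===== LEMMAS AND PROOFS =====

-- B's recursion only consumes fuel while 2*n - w - l stays positive, so any two
-- sufficient fuels give the same result.
theorem genRecF_fuel (f : Nat) : ∀ (g : Nat) (n : Int) (seq : List String) (w l : Int),
    (2 * n - w - l).toNat < f → (2 * n - w - l).toNat < g →
    genRecF n f seq w l = genRecF n g seq w l := by
  induction f with
  | zero => intro g n seq w l hf; omega
  | succ f ihf =>
    intro g n seq w l hf hg
    obtain ⟨g', rfl⟩ : ∃ g', g = g' + 1 := ⟨g - 1, by omega⟩
    rw [genRecF, genRecF]
    by_cases hp : w < n ∧ l < n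
    · rw [if_pos hp, if_pos hp,
        ihf g' n (seq ++ ["l"]) w (l + 1) (by omega) (by omega),
        ihf g' n (seq ++ ["w"]) (w + 1) l (by omega) (by omega)]
    · rw [if_neg hp, if_neg hp]

theorem pvMeasure_cons (n : Int) (seq : List String) (rest : List (List String)) :
    pvMeasure n (seq :: rest)
      = 3 ^ ((2 * n + 1 - (seq.count "w" : Int) - (seq.count "l" : Int)).toNat) + pvMeasure n rest := by
  simp [pvMeasure]

theorem pvPow3_two_lt {e : Nat} (h : 1 ≤ e) : 3 ^ (e - 1) + 3 ^ (e - 1) < 3 ^ e := by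
  have h3 : 3 ^ (e - 1) * 3 = 3 ^ e := by
    rw [← pow_succ]
    congr 1
    omega
  have h1 : 1 ≤ 3 ^ (e - 1) := Nat.one_le_pow _ _ (by norm_num)
  omega

theorem pvCount_append_l_w (seq : List String) :
    (((seq ++ ["l"]).count "w" : Nat) : Int) = (seq.count "w" : Int) := by
  simp [List.count_append]

theorem pvCount_append_l_l (seq : List String) :
    (((seq ++ ["l"]).count "l" : Nat) : Int) = (seq.count "l" : Int) + 1 := by
  simp [List.count_append]

theorem pvCount_append_w_w (seq : List String) :
    (((seq ++ ["w"]).count "w" : Nat) : Int) = (seq.count "w" : Int) + 1 := by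
  simp [List.count_append]

theorem pvCount_append_w_l (seq : List String) :
    (((seq ++ ["w"]).count "l" : Nat) : Int) = (seq.count "l" : Int) := by
  simp [List.count_append]

-- the pushed stack has a strictly smaller measure (two children replace the parent)
theorem pvLoopDec1 (n : Int) (seq : List String) (rest : List (List String))
    (h : (seq.count "w" : Int) < n ∧ (seq.count "l" : Int) < n) :
    pvMeasure n ((seq ++ ["l"]) :: (seq ++ ["w"]) :: rest) < pvMeasure n (seq :: rest) := by
  rw [pvMeasure_cons, pvMeasure_cons, pvMeasure_cons]
  rw [pvCount_append_l_w, pvCount_append_l_l, pvCount_append_w_w, pvCount_append_w_l]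
  have he : (2 * n + 1 - (seq.count "w" : Int) - ((seq.count "l" : Int) + 1)).toNat
      = (2 * n + 1 - (seq.count "w" : Int) - (seq.count "l" : Int)).toNat - 1 := by omega
  have he2 : (2 * n + 1 - ((seq.count "w" : Int) + 1) - (seq.count "l" : Int)).toNat
      = (2 * n + 1 - (seq.count "w" : Int) - (seq.count "l" : Int)).toNat - 1 := by omega
  rw [he, he2]
  have h1 : 1 ≤ (2 * n + 1 - (seq.count "w" : Int) - (seq.count "l" : Int)).toNat := by omega
  have := pvPow3_two_lt h1
  omega

theorem pvMeasure_pos (n : Int) (seq : List String) (rest : List (List String)) :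
    1 ≤ pvMeasure n (seq :: rest) := by
  rw [pvMeasure_cons]
  have h1 : 1 ≤ 3 ^ ((2 * n + 1 - (seq.count "w" : Int) - (seq.count "l" : Int)).toNat) :=
    Nat.one_le_pow _ _ (by norm_num)
  omega

-- With enough fuel, A's stack loop processes each stack entry exactly as B's DFS
-- does, in order.
theorem genLoopF_eq (f : Nat) : ∀ (n : Int) (work : List (List String)),
    pvMeasure n work ≤ f →
    genLoopF n f work
      = (work.map (fun s =>
          genRecF n ((2 * n - (s.count "w" : Int) - (s.count "l" : Int)).toNat + 1)
            s (s.count "w" : Int) (s.count "l" : Int))).flatten := by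
  induction f with
  | zero =>
    intro n work hf
    cases work with
    | nil => simp [genLoopF]
    | cons seq rest => exact absurd hf (by have := pvMeasure_pos n seq rest; omega)
  | succ f ihf =>
    intro n work hf
    cases work with
    | nil => simp [genLoopF]
    | cons seq rest =>
      rw [genLoopF]
      simp only [List.map_cons, List.flatten_cons]
      conv_rhs => rw [genRecF]
      by_cases hp : ((seq.count "w" : Int) < n ∧ (seq.count "l" : Int) < n)
      · rw [if_pos hp, if_pos hp]
        have hm : pvMeasure n ((seq ++ ["l"]) :: (seq ++ ["w"]) :: rest) ≤ f := by
          have := pvLoopDec1 n seq rest hp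
          omega
        rw [ihf n _ hm]
        simp only [List.map_cons, List.flatten_cons]
        rw [pvCount_append_l_w, pvCount_append_l_l, pvCount_append_w_w, pvCount_append_w_l]
        rw [genRecF_fuel _ ((2 * n - (seq.count "w" : Int) - (seq.count "l" : Int)).toNat)
              n (seq ++ ["l"]) _ _ (by omega) (by omega),
            genRecF_fuel _ ((2 * n - (seq.count "w" : Int) - (seq.count "l" : Int)).toNat)
              n (seq ++ ["w"]) _ _ (by omega) (by omega)]
        simp [List.append_assoc]
      · rw [if_neg hp, if_neg hp]
        have hm : pvMeasure n rest ≤ f := by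
          have h1 : 1 ≤ 3 ^ ((2 * n + 1 - (seq.count "w" : Int) - (seq.count "l" : Int)).toNat) :=
            Nat.one_le_pow _ _ (by norm_num)
          have := pvMeasure_cons n seq rest
          omega
        rw [ihf n rest hm]
        simp

-- ===== VERDICT (by name: the statement is the Claim_ definition above) =====
theorem genResult_spec : Claim_equal_genResult := by
  intro n _
  unfold Spec_genResult genResult genResult_alt
  rw [genLoopF_eq (pvMeasure n [[]]) n [[]] le_rfl]
  simp only [List.map_cons, List.map_nil, List.flatten_cons, List.flatten_nil,
    List.count_nil, Nat.cast_zero, List.append_nil]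
  rw [genRecF_fuel _ ((2 * n).toNat + 1) n [] 0 0 (by omega) (by omega)]
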